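-- pv_equiv track=rewrite | github.com/dogfish000/Algorithm | 프로그래머스/1/133502. 햄버거 만들기/햄버거 만들기.py | solution
-- ===== SOURCE A (Python) =====
-- def solution(ingredient):
--     answer = 0
--
--     lst = []
--
--     for i in ingredient:
--         lst.append(i)
--         if len(lst) >= 4:
--             if chk_burger(lst):
--                 answer += 1
--                 for _ in range(4):
--                     lst.pop()
--
--
--
--     return answer
--
-- def chk_burger(lst):
--     if lst[-1] == 1 and lst[-2] == 3 and lst[-3] == 2 and lst[-4] == 1:
--
--         return True
--
--     return False
-- ===== SOURCE B (Python) =====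
-- def solution(ingredient):
--     xs = list(ingredient)
--     answer = 0
--     i = 0
--     while i + 3 < len(xs):
--         if xs[i] == 1 and xs[i + 1] == 2 and xs[i + 2] == 3 and xs[i + 3] == 1:
--             del xs[i:i + 4]
--             answer += 1
--             i = max(i - 3, 0)
--         else:
--             i += 1
--     return answer
-- ===== Notes on version B (the rewrite author's own statement) =====
-- stated objective: alternative
-- what changed: A's auxiliary stack (append each ingredient, check the top four, pop four on a match) is replaced by in-place deletion of the leftmost burger pattern 1,2,3,1 from the list itself, with a scan pointer that backs up 3 positions after each deletion.
import Mathlib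
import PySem

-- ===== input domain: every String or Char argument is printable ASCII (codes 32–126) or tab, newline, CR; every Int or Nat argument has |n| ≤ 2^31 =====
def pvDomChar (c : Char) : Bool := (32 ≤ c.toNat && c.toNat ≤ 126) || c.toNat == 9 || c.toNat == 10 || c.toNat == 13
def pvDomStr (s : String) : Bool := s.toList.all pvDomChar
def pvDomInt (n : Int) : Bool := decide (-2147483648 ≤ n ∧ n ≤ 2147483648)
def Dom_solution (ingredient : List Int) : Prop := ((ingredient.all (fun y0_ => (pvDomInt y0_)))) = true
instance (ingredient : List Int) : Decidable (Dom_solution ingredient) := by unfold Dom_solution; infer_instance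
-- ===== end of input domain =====

-- B replaces A's auxiliary stack (push each item, pop 4 on a match at the top) with in-place deletion
-- of the leftmost burger pattern occurrence and a backtracking scan pointer (objective: alternative;
-- equal return value; neither version mutates the caller's list — B works on a copy).

-- ===== PORT A =====
-- chk_burger(lst): lst[-1]==1 and lst[-2]==3 and lst[-3]==2 and lst[-4]==1.
-- (Python would raise IndexError for len(lst)<4; A only calls it under len(lst)>=4, where this is exact.)
def chk_burger (lst : List Int) : Bool :=
  (PySem.List.pyGet? lst (-1) == some 1) && (PySem.List.pyGet? lst (-2) == some 3) &&
    (PySem.List.pyGet? lst (-3) == some 2) && (PySem.List.pyGet? lst (-4) == some 1)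

def solution (ingredient : List Int) : Int :=
  (ingredient.foldl
    (fun (st : Int × List Int) (i : Int) =>
      let lst := st.2 ++ [i]                -- lst.append(i)
      if 4 ≤ lst.length then                -- if len(lst) >= 4
        if chk_burger lst then
          (st.1 + 1, lst.dropLast.dropLast.dropLast.dropLast)   -- answer += 1; four lst.pop()
        else (st.1, lst)
      else (st.1, lst))
    ((0 : Int), ([] : List Int))).1

-- ===== PORT B =====
-- termination helper for the while-loop: del xs[i:i+4] shortens xs by 4 (the guard gives i+4 ≤ len)
theorem pvB_measure {xs : List Int} {i : Nat} (h : i + 3 < xs.length) :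
    (xs.take i ++ xs.drop (i + 4)).length - (i - 3) < xs.length - i := by
  simp only [List.length_append, List.length_take, List.length_drop]
  omega

-- while i + 3 < len(xs): if xs[i..i+3] == 1,2,3,1 then del xs[i:i+4]; answer += 1; i = max(i-3,0)
-- else i += 1.  The index i is ported as Nat (Python keeps i >= 0 throughout): max(i-3, 0) is Nat
-- subtraction i-3, the reads xs[i]..xs[i+3] (in range under the guard) are xs[i]?.., and
-- del xs[i:i+4] is xs.take i ++ xs.drop (i+4) — each exact for 0 ≤ i.
def bLoop (answer : Int) (i : Nat) (xs : List Int) : Int :=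
  if h : i + 3 < xs.length then
    if xs[i]? == some 1 && xs[i+1]? == some 2 && xs[i+2]? == some 3 && xs[i+3]? == some 1 then
      bLoop (answer + 1) (i - 3) (xs.take i ++ xs.drop (i + 4))
    else
      bLoop answer (i + 1) xs
  else answer
termination_by xs.length - i
decreasing_by
  · exact pvB_measure h
  · omega

def solution_alt (ingredient : List Int) : Int := bLoop 0 0 ingredient

-- ===== PRECONDITION & SPEC =====
def Spec_solution (ingredient : List Int) (out : Int) : Prop := out = solution_alt ingredient
instance (ingredient : List Int) (out : Int) : Decidable (Spec_solution ingredient out) := by unfold Spec_solution; infer_instance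

-- ===== CLAIM (what is proved, stated in full; the proofs are below) =====
def Claim_equal_solution : Prop := ∀ (ingredient : List Int), Dom_solution ingredient → Spec_solution ingredient (solution ingredient)

-- ===== LEMMAS AND PROOFS =====

-- A's loop body, named (definitionally equal to the lambda in `solution`)
def fstep (st : Int × List Int) (i : Int) : Int × List Int :=
  let lst := st.2 ++ [i]
  if 4 ≤ lst.length then
    if chk_burger lst then (st.1 + 1, lst.dropLast.dropLast.dropLast.dropLast)
    else (st.1, lst)
  else (st.1, lst)

theorem solution_eq_fold (ingredient : List Int) :
    solution ingredient = (ingredient.foldl fstep ((0 : Int), ([] : List Int))).1 := rfl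

-- the same automaton on the REVERSED stack (head = top of A's Python list)
def gstep (st : Int × List Int) (x : Int) : Int × List Int :=
  if x = 1 ∧ st.2.take 3 = [3, 2, 1] then (st.1 + 1, st.2.drop 3) else (st.1, x :: st.2)

def cnt (xs : List Int) : Int := (xs.foldl gstep ((0 : Int), ([] : List Int))).1

-- one deletion step of the rewriting view: remove the LEFTMOST occurrence of [1,2,3,1]

def reduceOnce : List Int → Option (List Int)
  | [] => none
  | x :: xs => if (x :: xs).take 4 = [1, 2, 3, 1] then some (xs.drop 3)
               else (reduceOnce xs).map (x :: ·)

theorem reduceOnce_ne_none (u v : List Int) :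
    reduceOnce (u ++ ([1, 2, 3, 1] ++ v)) ≠ none := by
  induction u with
  | nil => simp [reduceOnce]
  | cons x u ih =>
    rw [List.cons_append, reduceOnce]
    split
    · simp
    · simpa using ih

theorem reduceOnce_prefix {l1 l2 : List Int} (h : reduceOnce (l1 ++ l2) = none) :
    reduceOnce l1 = none := by
  induction l1 with
  | nil => rfl
  | cons x t ih =>
    rw [List.cons_append, reduceOnce] at h
    split at h
    · simp at h
    · next hne =>
      rw [Option.map_eq_none_iff] at h
      rw [reduceOnce]
      split
      · next htk =>
        exfalso
        apply hne
        rw [show x :: (t ++ l2) = (x :: t) ++ l2 from rfl,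
          List.take_append_of_le_length (by
            have := congrArg List.length htk
            have hl : (x :: t).length = t.length + 1 := by simp
            simp only [List.length_take] at this
            have hp : ([1,2,3,1] : List Int).length = 4 := rfl
            omega), htk]
      · rw [Option.map_eq_none_iff]; exact ih h

theorem reduceOnce_short {l : List Int} (h : l.length < 4) : reduceOnce l = none := by
  induction l with
  | nil => rfl
  | cons x t ih =>
    rw [reduceOnce]
    split
    · next htk =>
      have := congrArg List.length htk
      have hl : (x :: t).length = t.length + 1 := by simp
      simp only [List.length_take] at this
      have hp : ([1,2,3,1] : List Int).length = 4 := rfl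
      omega
    · rw [Option.map_eq_none_iff]
      exact ih (by simp at h ⊢; omega)

theorem reduceOnce_some {l ys : List Int} (h : reduceOnce l = some ys) :
    ∃ u v, l = u ++ ([1, 2, 3, 1] ++ v) := by
  induction l generalizing ys with
  | nil => simp [reduceOnce] at h
  | cons x t ih =>
    rw [reduceOnce] at h
    split at h
    · next htk =>
      refine ⟨[], t.drop 3, ?_⟩
      calc x :: t = (x :: t).take 4 ++ (x :: t).drop 4 := (List.take_append_drop _ _).symm
        _ = [1,2,3,1] ++ t.drop 3 := by rw [htk]; rfl
    · rw [Option.map_eq_some_iff] at h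
      obtain ⟨ys', h', rfl⟩ := h
      obtain ⟨u, v, rfl⟩ := ih h'
      exact ⟨x :: u, v, rfl⟩




-- pyGet? with a negative index, read off the reversed list
theorem pyGet?_rev (l : List Int) (k : Nat) (h1 : 0 < k) (h2 : k ≤ l.length) :
    PySem.List.pyGet? l (-(k : Int)) = l.reverse[k - 1]? := by
  rw [PySem.List.pyGet?_neg_natCast l k h1 h2, List.getElem?_reverse (by omega)]
  congr 1
  omega

theorem chk_rev (s : List Int) (x : Int) (hlen3 : 3 ≤ s.length) :
    chk_burger (s ++ [x]) =
      ((x :: s.reverse)[0]? == some 1 && (x :: s.reverse)[1]? == some 3 &&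
       (x :: s.reverse)[2]? == some 2 && (x :: s.reverse)[3]? == some 1) := by
  have hl : 4 ≤ (s ++ [x]).length := by simp; omega
  rw [chk_burger,
      show (-1 : Int) = -((1 : Nat) : Int) by norm_num, pyGet?_rev _ 1 (by omega) (by omega),
      show (-2 : Int) = -((2 : Nat) : Int) by norm_num, pyGet?_rev _ 2 (by omega) (by omega),
      show (-3 : Int) = -((3 : Nat) : Int) by norm_num, pyGet?_rev _ 3 (by omega) (by omega),
      show (-4 : Int) = -((4 : Nat) : Int) by norm_num, pyGet?_rev _ 4 (by omega) (by omega)]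
  rw [List.reverse_append]
  norm_num

theorem chk_iff (s : List Int) (x : Int) :
    (4 ≤ (s ++ [x]).length ∧ chk_burger (s ++ [x]) = true) ↔
      (x = 1 ∧ s.reverse.take 3 = [3, 2, 1]) := by
  constructor
  · rintro ⟨hlen, hchk⟩
    have hlen3 : 3 ≤ s.length := by simp at hlen; omega
    rw [chk_rev s x hlen3] at hchk
    have hsr : 3 ≤ s.reverse.length := by simp; omega
    match hs : s.reverse with
    | [] => rw [hs] at hsr; simp at hsr
    | [a] => rw [hs] at hsr; simp at hsr
    | [a, b] => rw [hs] at hsr; simp at hsr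
    | a :: b :: c :: r =>
      rw [hs] at hchk
      simp only [List.getElem?_cons_zero, List.getElem?_cons_succ,
        Bool.and_eq_true, beq_iff_eq, Option.some_inj] at hchk
      obtain ⟨⟨⟨h1, h2⟩, h3⟩, h4⟩ := hchk
      subst h1; subst h2; subst h3; subst h4
      simp
  · rintro ⟨hx, htk⟩
    have hsr : s.reverse = 3 :: 2 :: 1 :: s.reverse.drop 3 := by
      conv_lhs => rw [← List.take_append_drop 3 s.reverse, htk]
      rfl
    have hlen3 : 3 ≤ s.length := by
      have := congrArg List.length hsr; simp at this; omega
    refine ⟨by simp; omega, ?_⟩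
    rw [chk_rev s x hlen3, hsr, hx]
    simp

theorem fstep_eq_gstep (a : Int) (s : List Int) (x : Int) :
    fstep (a, s) x = ((gstep (a, s.reverse) x).1, (gstep (a, s.reverse) x).2.reverse) := by
  by_cases hc : x = 1 ∧ s.reverse.take 3 = [3, 2, 1]
  · have h4 := (chk_iff s x).2 hc
    obtain ⟨hx, htk⟩ := hc
    have hsr : s.reverse = 3 :: 2 :: 1 :: s.reverse.drop 3 := by
      conv_lhs => rw [← List.take_append_drop 3 s.reverse, htk]
      rfl
    have hs : s = (s.reverse.drop 3).reverse ++ [1, 2, 3] := by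
      conv_lhs => rw [← List.reverse_reverse s, hsr]
      simp
    rw [show fstep (a, s) x = (a + 1, (s ++ [x]).dropLast.dropLast.dropLast.dropLast) by
          simp only [fstep]; rw [if_pos h4.1, if_pos h4.2],
        show gstep (a, s.reverse) x = (a + 1, s.reverse.drop 3) by simp [gstep, hx, htk]]
    refine Prod.ext_iff.mpr ⟨rfl, ?_⟩
    show (s ++ [x]).dropLast.dropLast.dropLast.dropLast = (s.reverse.drop 3).reverse
    conv_lhs => rw [hs, hx]
    rw [show s.reverse.drop 3 = ((s.reverse.drop 3).reverse ++ [1, 2, 3] ++ [1]).reverse.drop 4 by simp]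
    simp
  · have hnot : ¬ (4 ≤ (s ++ [x]).length ∧ chk_burger (s ++ [x]) = true) :=
      fun h => hc ((chk_iff s x).1 h)
    rw [show gstep (a, s.reverse) x = (a, x :: s.reverse) by simp [gstep, hc]]
    by_cases hl : 4 ≤ (s ++ [x]).length
    · have hb : chk_burger (s ++ [x]) = false :=
        Bool.eq_false_iff.mpr (fun hb => hnot ⟨hl, hb⟩)
      rw [show fstep (a, s) x = (a, s ++ [x]) by
            simp only [fstep]; rw [if_pos hl, if_neg (by rw [hb]; exact Bool.false_ne_true)]]
      refine Prod.ext_iff.mpr ⟨rfl, by simp⟩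
    · rw [show fstep (a, s) x = (a, s ++ [x]) by simp only [fstep]; rw [if_neg hl]]
      refine Prod.ext_iff.mpr ⟨rfl, by simp⟩

theorem fold_f_eq_fold_g (xs : List Int) (a : Int) (s : List Int) :
    xs.foldl fstep (a, s) =
      ((xs.foldl gstep (a, s.reverse)).1, (xs.foldl gstep (a, s.reverse)).2.reverse) := by
  induction xs generalizing a s with
  | nil => simp
  | cons x xs ih =>
    rw [List.foldl_cons, List.foldl_cons, fstep_eq_gstep]
    rw [ih]
    congr 1 <;> rw [List.reverse_reverse]

theorem fold_g_shift (xs : List Int) (a : Int) (r : List Int) :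
    xs.foldl gstep (a, r) = (a + (xs.foldl gstep (0, r)).1, (xs.foldl gstep (0, r)).2) := by
  induction xs generalizing a r with
  | nil => simp
  | cons x xs ih =>
    by_cases h : x = 1 ∧ r.take 3 = [3, 2, 1]
    · rw [List.foldl_cons, List.foldl_cons,
          show gstep (a, r) x = (a + 1, r.drop 3) by simp [gstep, h],
          show gstep (0, r) x = (0 + 1, r.drop 3) by simp [gstep, h],
          ih (a + 1), ih (0 + 1)]
      refine Prod.ext_iff.mpr ⟨by ring, rfl⟩
    · rw [List.foldl_cons, List.foldl_cons,
          show gstep (a, r) x = (a, x :: r) by simp [gstep, h],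
          show gstep (0, r) x = (0, x :: r) by simp [gstep, h],
          ih a, ih 0]


theorem fold_g_nopop (xs : List Int) : ∀ (a : Int) (r : List Int),
    reduceOnce (r.reverse ++ xs) = none → xs.foldl gstep (a, r) = (a, xs.reverse ++ r) := by
  induction xs with
  | nil => intro a r h; simp
  | cons x xs ih =>
    intro a r h
    have hpush : ¬ (x = 1 ∧ r.take 3 = [3, 2, 1]) := by
      rintro ⟨hx, htk⟩
      subst hx
      have hr : r = 3 :: 2 :: 1 :: r.drop 3 := by
        conv_lhs => rw [← List.take_append_drop 3 r, htk]
        rfl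
      have heq : r.reverse ++ 1 :: xs = (r.drop 3).reverse ++ ([1, 2, 3, 1] ++ xs) := by
        conv_lhs => rw [hr]
        simp
      exact reduceOnce_ne_none _ _ (by rw [← heq]; exact h)
    rw [List.foldl_cons, show gstep (a, r) x = (a, x :: r) by simp [gstep, hpush]]
    rw [ih a (x :: r) (by rw [← h]; congr 1; simp)]
    simp

theorem cnt_none {xs : List Int} (h : reduceOnce xs = none) : cnt xs = 0 := by
  unfold cnt
  rw [fold_g_nopop xs 0 [] (by simpa using h)]

theorem cnt_step (u v : List Int) (hu : reduceOnce (u ++ [1, 2, 3]) = none) :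
    cnt (u ++ ([1, 2, 3, 1] ++ v)) = 1 + cnt (u ++ v) := by
  have hu0 : reduceOnce u = none := reduceOnce_prefix hu
  have hfu : ∀ b : Int, u.foldl gstep (b, []) = (b, u.reverse) := by
    intro b
    rw [fold_g_nopop u b [] (by simpa using hu0)]
    simp
  have hnotop : ¬ (u.reverse.take 3 = [3, 2, 1]) := by
    intro htk
    have hr : u.reverse = 3 :: 2 :: 1 :: u.reverse.drop 3 := by
      conv_lhs => rw [← List.take_append_drop 3 u.reverse, htk]
      rfl
    have heq : u ++ [1, 2, 3] = (u.reverse.drop 3).reverse ++ ([1, 2, 3, 1] ++ [2, 3]) := by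
      conv_lhs => rw [show u = u.reverse.reverse by simp, hr]
      simp
    exact reduceOnce_ne_none _ _ (by rw [← heq]; exact hu)
  have hp : ([1, 2, 3, 1] : List Int).foldl gstep (0, u.reverse) = (1, u.reverse) := by
    show List.foldl gstep (gstep (gstep (gstep (gstep (0, u.reverse) 1) 2) 3) 1) [] = (1, u.reverse)
    rw [show gstep (0, u.reverse) 1 = (0, 1 :: u.reverse) by simp [gstep, hnotop],
        show gstep ((0 : Int), (1 : Int) :: u.reverse) 2 = (0, 2 :: 1 :: u.reverse) by norm_num [gstep],
        show gstep ((0 : Int), (2 : Int) :: 1 :: u.reverse) 3 = (0, 3 :: 2 :: 1 :: u.reverse) by norm_num [gstep],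
        show gstep ((0 : Int), (3 : Int) :: 2 :: 1 :: u.reverse) 1 = (0 + 1, u.reverse) by simp [gstep]]
    simp
  unfold cnt
  rw [show u ++ ([1, 2, 3, 1] ++ v) = (u ++ [1, 2, 3, 1]) ++ v by simp]
  rw [List.foldl_append, List.foldl_append, List.foldl_append, hfu 0, hp,
      fold_g_shift v 1 u.reverse]

theorem bLoop_eq_cnt : ∀ (a : Int) (i : Nat) (xs : List Int),
    reduceOnce (xs.take (i + 3)) = none → bLoop a i xs = a + cnt xs := by
  intro a i xs
  induction a, i, xs using bLoop.induct with
  | case1 a i xs h hc ih =>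
    intro hinv
    have hcb := hc
    simp only [Bool.and_eq_true, beq_iff_eq] at hc
    obtain ⟨⟨⟨hc0, hc1⟩, hc2⟩, hc3⟩ := hc
    obtain ⟨hb0, e0⟩ := List.getElem?_eq_some_iff.mp hc0
    obtain ⟨hb1, e1⟩ := List.getElem?_eq_some_iff.mp hc1
    obtain ⟨hb2, e2⟩ := List.getElem?_eq_some_iff.mp hc2
    obtain ⟨hb3, e3⟩ := List.getElem?_eq_some_iff.mp hc3
    have hdrop : xs.drop i = 1 :: 2 :: 3 :: 1 :: xs.drop (i + 4) := by
      rw [← List.getElem_cons_drop hb0, e0, ← List.getElem_cons_drop hb1, e1,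
          ← List.getElem_cons_drop hb2, e2, ← List.getElem_cons_drop hb3, e3]
    have hxs : xs = xs.take i ++ ([1, 2, 3, 1] ++ xs.drop (i + 4)) := by
      conv_lhs => rw [← List.take_append_drop i xs, hdrop]
      rfl
    have hu : reduceOnce (xs.take i ++ [1, 2, 3]) = none := by
      have ht : xs.take (i + 3) = xs.take i ++ [1, 2, 3] := by
        rw [List.take_add, hdrop]
        rfl

      rw [← ht]; exact hinv
    have hinv' : reduceOnce ((xs.take i ++ xs.drop (i + 4)).take (i - 3 + 3)) = none := by
      by_cases hi : 3 ≤ i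
      · rw [show i - 3 + 3 = i by omega,
            List.take_left' (by rw [List.length_take]; omega)]
        exact reduceOnce_prefix hu
      · rw [show i - 3 + 3 = 3 by omega]
        exact reduceOnce_short
          (by have := List.length_take_le 3 (xs.take i ++ xs.drop (i + 4)); omega)
    rw [show bLoop a i xs = bLoop (a + 1) (i - 3) (xs.take i ++ xs.drop (i + 4)) by
          rw [bLoop]; rw [dif_pos h, if_pos hcb],
        ih hinv']
    conv_rhs => rw [hxs, cnt_step _ _ hu]
    ring
  | case2 a i xs h hc ih =>
    intro hinv
    have hnew : reduceOnce (xs.take (i + 1 + 3)) = none := by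
      rw [show i + 1 + 3 = (i + 3) + 1 by omega, List.take_add_one, List.getElem?_eq_getElem h]
      show reduceOnce (xs.take (i + 3) ++ [xs[i + 3]]) = none
      cases hro : reduceOnce (xs.take (i + 3) ++ [xs[i + 3]]) with
      | none => rfl
      | some ys =>
        exfalso
        obtain ⟨u, v, heq⟩ := reduceOnce_some hro
        rcases List.eq_nil_or_concat v with rfl | ⟨v', c, rfl⟩
        · have h1 : xs.take (i + 3) = u ++ [1, 2, 3] := by
            have := congrArg List.dropLast heq
            rwa [List.dropLast_concat, List.append_nil,
                show u ++ [1, 2, 3, 1] = (u ++ [1, 2, 3]) ++ [1] by simp,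
                List.dropLast_concat] at this
          have hy : xs[i + 3] = 1 := by
            have := congrArg List.getLast? heq
            rw [List.getLast?_concat, List.append_nil,
                show u ++ [1, 2, 3, 1] = (u ++ [1, 2, 3]) ++ [1] by simp,
                List.getLast?_concat] at this
            exact Option.some_inj.mp this
          have hlu : u.length = i := by
            have := congrArg List.length h1
            simp only [List.length_take, List.length_append] at this
            have hp3 : ([1, 2, 3] : List Int).length = 3 := rfl
            omega
          have e0 : xs[i]? = some 1 := by
            have h2 : (xs.take (i + 3))[i]? = some 1 := by
              rw [h1, List.getElem?_append_right (by omega), hlu]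
              simp
            rwa [List.getElem?_take, if_pos (by omega)] at h2
          have e1 : xs[i + 1]? = some 2 := by
            have h2 : (xs.take (i + 3))[i + 1]? = some 2 := by
              rw [h1, List.getElem?_append_right (by omega), hlu]
              rw [show i + 1 - i = 1 by omega]
              simp
            rwa [List.getElem?_take, if_pos (by omega)] at h2
          have e2 : xs[i + 2]? = some 3 := by
            have h2 : (xs.take (i + 3))[i + 2]? = some 3 := by
              rw [h1, List.getElem?_append_right (by omega), hlu]
              rw [show i + 2 - i = 2 by omega]
              simp
            rwa [List.getElem?_take, if_pos (by omega)] at h2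
          have e3 : xs[i + 3]? = some 1 := by
            rw [List.getElem?_eq_getElem h, hy]
          rw [e0, e1, e2, e3] at hc
          simp at hc
        · have h1 : xs.take (i + 3) = u ++ ([1, 2, 3, 1] ++ v') := by
            have := congrArg List.dropLast heq
            rwa [List.dropLast_concat,
                show u ++ ([1, 2, 3, 1] ++ v'.concat c) = (u ++ ([1, 2, 3, 1] ++ v')) ++ [c] by simp,
                List.dropLast_concat] at this
          exact reduceOnce_ne_none u v' (by rw [← h1]; exact hinv)
    rw [show bLoop a i xs = bLoop a (i + 1) xs by rw [bLoop]; rw [dif_pos h, if_neg hc],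
        ih hnew]
  | case3 a i xs h =>
    intro hinv
    rw [List.take_of_length_le (by omega)] at hinv
    rw [bLoop]
    simp [h, cnt_none hinv]

-- ===== VERDICT (by name: the statement is the Claim_ definition above) =====
theorem solution_spec : Claim_equal_solution := by
  intro ingredient _
  unfold Spec_solution
  rw [solution_eq_fold, fold_f_eq_fold_g]
  unfold solution_alt
  rw [bLoop_eq_cnt 0 0 ingredient
        (reduceOnce_short (by have := List.length_take_le (0 + 3) ingredient; omega))]
  simp [cnt]
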